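-- pv_equiv track=rewrite | github.com/dimv36/buildrepo | buildrepo.py | __best_dependency_resolved
-- ===== SOURCE A (Python) =====
-- def __best_dependency_resolved(deps_map):
--     best = None
--     rdep = None
--     for dep, resinfo in deps_map.items():
--         depdest, pdstinfo, resolved, required_by = resinfo
--         if not best:
--             rdep, best = dep, resinfo
--         else:
--             olddepdest, *unused = best
--             if depdest < olddepdest:
--                 rdep, best = dep, resinfo
--     return rdep, best
-- ===== SOURCE B (Python) =====
-- def __best_dependency_resolved(deps_map):
--     if not deps_map:
--         return None, None
--
--     def by_depdest(item):
--         depdest, pdstinfo, resolved, required_by = item[1]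
--         return depdest
--
--     ordered = sorted(deps_map.items(), key=by_depdest)
--     rdep, best = ordered[0]
--     return rdep, best
-- ===== Notes on version B (the rewrite author's own statement) =====
-- stated objective: alternative
-- what changed: A's manual running-minimum loop with Option state is replaced by a stable sort of the items on the depdest key followed by taking the first entry (stability preserves A's first-wins tie behaviour); the empty map is guarded explicitly.
import Mathlib
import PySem

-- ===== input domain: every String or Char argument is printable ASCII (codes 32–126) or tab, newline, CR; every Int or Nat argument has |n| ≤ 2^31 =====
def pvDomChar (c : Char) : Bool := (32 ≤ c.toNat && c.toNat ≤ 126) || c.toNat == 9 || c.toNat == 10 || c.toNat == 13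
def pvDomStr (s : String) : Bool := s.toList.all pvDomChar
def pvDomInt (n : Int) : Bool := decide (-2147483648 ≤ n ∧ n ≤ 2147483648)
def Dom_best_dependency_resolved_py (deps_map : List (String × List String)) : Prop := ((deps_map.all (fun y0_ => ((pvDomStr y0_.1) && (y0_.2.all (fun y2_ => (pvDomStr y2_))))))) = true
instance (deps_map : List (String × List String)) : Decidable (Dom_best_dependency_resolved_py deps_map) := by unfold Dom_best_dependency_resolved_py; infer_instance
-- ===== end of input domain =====

-- B replaces A's manual running-minimum loop by a stable sort on depdest and takes the first entry (alternative decomposition, same result).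


-- ===== PORT A =====
-- Literal port of A's loop: state (rdep, best) starts at (none, none); 'if not best' is the
-- none test (a stored best is a 4-field tuple under Pre_, hence truthy); 'depdest < olddepdest'
-- is resinfo[0] < best[0], written headD "" (exact under Pre_, where every value has 4 fields;
-- on shorter values Python's unpacking raises ValueError, which Pre_ excludes).
def best_dependency_resolved_py (deps_map : List (String × List String)) : Option String × Option (List String) :=
  deps_map.foldl
    (fun st p =>
      match st.2 with
      | none => (some p.1, some p.2)
      | some best => if p.2.headD "" < best.headD "" then (some p.1, some p.2) else st)
    (none, none)

-- ===== PORT B =====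
-- Literal port of Source B: empty guard, stable sort on by_depdest, first element of the sorted
-- list. by_depdest unpacks the 4-field record and returns depdest, i.e. the value's first
-- field, written headD "" (exact under Pre_; on other shapes Python raises ValueError, which
-- Pre_ excludes).
def best_dependency_resolved_py_alt (deps_map : List (String × List String)) : Option String × Option (List String) :=
  match deps_map with
  | [] => (none, none)
  | _ :: _ =>
    match PySem.List.sorted deps_map (fun kv => kv.2.headD "") false with
    | [] => (none, none)  -- unreachable: sorted of a nonempty list is nonempty
    | p :: _ => (some p.1, some p.2)

-- ===== PRECONDITION & SPEC =====
-- Pre_ excludes exactly the inputs where A raises: a value without exactly 4 fields makes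
-- A's 'depdest, pdstinfo, resolved, required_by = resinfo' raise ValueError.
def Pre_best_dependency_resolved_py (deps_map : List (String × List String)) : Prop :=
  ∀ p ∈ deps_map, p.2.length = 4
instance (deps_map : List (String × List String)) : Decidable (Pre_best_dependency_resolved_py deps_map) := by unfold Pre_best_dependency_resolved_py; infer_instance
def pvWitness_best_dependency_resolved_py : (List (String × List String)) := [("a", ["d", "p", "r", "q"])]

def Spec_best_dependency_resolved_py (deps_map : List (String × List String)) (out : Option String × Option (List String)) : Prop := out = best_dependency_resolved_py_alt deps_map
instance (deps_map : List (String × List String)) (out : Option String × Option (List String)) : Decidable (Spec_best_dependency_resolved_py deps_map out) := by unfold Spec_best_dependency_resolved_py; infer_instance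

-- ===== CLAIM (what is proved, stated in full; the proofs are below) =====
def Claim_equal_best_dependency_resolved_py : Prop := ∀ (deps_map : List (String × List String)), Dom_best_dependency_resolved_py deps_map → Pre_best_dependency_resolved_py deps_map → Spec_best_dependency_resolved_py deps_map (best_dependency_resolved_py deps_map)

-- ===== LEMMAS AND PROOFS =====

-- The key A and B both minimise: the first field of a value.
def pvKey (kv : String × List String) : String := kv.2.headD ""

-- The first-minimum fold both programs compute: starting from x, replace on strictly smaller key.
def pvUpd (m p : String × List String) : String × List String :=
  if pvKey p < pvKey m then p else m

-- A's loop, once the state is (some x.1, some x.2), is the pvUpd fold.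
lemma a_fold_eq (t : List (String × List String)) (x : String × List String) :
    t.foldl
      (fun st p =>
        match st.2 with
        | none => (some p.1, some p.2)
        | some best => if p.2.headD "" < best.headD "" then (some p.1, some p.2) else st)
      (some x.1, some x.2)
    = (some (t.foldl pvUpd x).1, some (t.foldl pvUpd x).2) := by
  induction t generalizing x with
  | nil => rfl
  | cons p t ih =>
    simp only [List.foldl_cons]
    rw [show (if p.2.headD "" < x.2.headD "" then ((some p.1, some p.2) : Option String × Option (List String)) else (some x.1, some x.2)) = (some (pvUpd x p).1, some (pvUpd x p).2) by
      unfold pvUpd pvKey; split_ifs <;> rfl]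
    exact ih (pvUpd x p)

-- The head of the stable sort is the first key-minimal element (A's strict-< fold).
lemma head_sorted_eq (xs : List (String × List String)) :
    (PySem.List.sorted xs pvKey false).head? =
      (match xs with
       | [] => none
       | x :: t => some (t.foldl pvUpd x)) := by
  induction xs using List.reverseRecOn with
  | nil => rfl
  | append_singleton xs x ih =>
    rw [PySem.List.sorted_eq_foldl_insertBy, List.foldl_append, ← PySem.List.sorted_eq_foldl_insertBy]
    simp only [List.foldl_cons, List.foldl_nil]
    cases hxs : xs with
    | nil => rfl
    | cons y t =>
      rw [hxs] at ih
      cases hs : PySem.List.sorted (y :: t) pvKey false with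
      | nil => exact absurd ((PySem.List.sorted_eq_nil_iff _ _ _).mp hs) (by simp)
      | cons m rest =>
        rw [hs] at ih
        simp only [List.head?] at ih
        have hm : m = t.foldl pvUpd y := by simpa using ih
        show (PySem.List.insertBy (fun a b => decide (pvKey a < pvKey b)) x (m :: rest)).head? =
          some ((t ++ [x]).foldl pvUpd y)
        rw [List.foldl_append, ← hm]
        simp only [PySem.List.insertBy, List.foldl_cons, List.foldl_nil]
        unfold pvUpd
        by_cases h : pvKey x < pvKey m
        · simp [h]
        · simp [h]

-- ===== VERDICT (by name: the statement is the Claim_ definition above) =====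
theorem best_dependency_resolved_py_spec : Claim_equal_best_dependency_resolved_py := by
  intro deps_map _ _
  unfold Spec_best_dependency_resolved_py best_dependency_resolved_py best_dependency_resolved_py_alt
  cases hxs : deps_map with
  | nil => rfl
  | cons x t =>
    have hh := head_sorted_eq (x :: t)
    simp only [List.foldl_cons]
    rw [a_fold_eq]
    cases hs : PySem.List.sorted (x :: t) (fun kv => kv.2.headD "") false with
    | nil => exact absurd ((PySem.List.sorted_eq_nil_iff _ _ _).mp hs) (by simp)
    | cons m rest =>
      have : m = t.foldl pvUpd x := by
        rw [show (fun kv : String × List String => kv.2.headD "") = pvKey from rfl] at hs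
        rw [hs] at hh; simpa using hh
      rw [this]
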